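-- pv_equiv track=rewrite | github.com/vitushasha/is_demo | supervisorsfinder/views/views.py | find_supervisor
-- ===== SOURCE A (Python) =====
-- def find_supervisor(departments_dict, current_dep='1', order=0):
--     """Рекурсивая функция, осуществляющая поиск начальника, если в настоящем
--     подразделении он не был найден."""
--
--     department = departments_dict[current_dep]
--     parent_exists = ('PARENT' in department)
--     supervisor = department.get('UF_HEAD')
--     supervisor_exists = (supervisor and (supervisor != '0'))
--
--     if supervisor_exists:
--         return department['UF_HEAD'], order
--     else:
--         if not parent_exists:
--             return "None", order
--         return find_supervisor(departments_dict, department['PARENT'], order + 1)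
-- ===== SOURCE B (Python) =====
-- def find_supervisor(departments_dict, current_dep='1', order=0):
--     """Two-stage version: first materialize the visited parent chain as a list,
--     then scan that list for the first department with a truthy head."""
--     chain = []
--     cur = current_dep
--     while True:
--         department = departments_dict[cur]
--         chain.append(department)
--         head = department.get('UF_HEAD')
--         if (head and head != '0') or 'PARENT' not in department:
--             break
--         cur = department['PARENT']
--     for i, department in enumerate(chain):
--         head = department.get('UF_HEAD')
--         if head and head != '0':
--             return head, order + i
--     return "None", order + len(chain) - 1
-- ===== Notes on version B (the rewrite author's own statement) =====
-- stated objective: alternative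
-- what changed: The recursion is replaced by a two-stage algorithm: a loop first materializes the visited parent chain as a list, then a separate enumerate scan over that list finds the first truthy head (or falls through to the 'None' answer).
import Mathlib
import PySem

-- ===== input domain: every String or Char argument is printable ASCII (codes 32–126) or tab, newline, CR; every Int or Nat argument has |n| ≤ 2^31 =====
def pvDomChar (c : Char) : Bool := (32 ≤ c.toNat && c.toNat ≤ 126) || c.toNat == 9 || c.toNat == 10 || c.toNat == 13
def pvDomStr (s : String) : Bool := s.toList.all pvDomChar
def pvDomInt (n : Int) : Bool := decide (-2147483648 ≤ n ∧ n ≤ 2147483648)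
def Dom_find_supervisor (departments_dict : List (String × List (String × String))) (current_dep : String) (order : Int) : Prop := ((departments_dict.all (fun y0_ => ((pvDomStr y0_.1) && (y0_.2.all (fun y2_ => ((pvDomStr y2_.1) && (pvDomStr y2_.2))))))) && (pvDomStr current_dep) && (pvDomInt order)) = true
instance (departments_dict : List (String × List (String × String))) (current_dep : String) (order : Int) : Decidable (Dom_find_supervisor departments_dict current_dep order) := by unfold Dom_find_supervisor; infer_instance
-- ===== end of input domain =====

-- B replaces A's recursion by a two-stage algorithm (collect the visited chain, then scan it); return value only.

-- ===== PORT A =====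
-- A's recursion, with a fuel counter only to make it total in Lean; on every input
-- admitted by Pre_ the fuel (length + 1) is never exhausted.
def pvFindSupA (dd : PySem.Dict String (List (String × String))) : Nat → String → Int → Option (String × Int)
  | 0, _, _ => none
  | fuel + 1, current_dep, order =>
    match dd.get? current_dep with
    | none => none        -- KeyError in Python: excluded by Pre_
    | some department =>
      let dep := PySem.Dict.ofList department
      let parent_exists := dep.contains "PARENT"
      let supervisor := dep.get? "UF_HEAD"
      let supervisor_exists := match supervisor with
        | none => false
        | some s => s != "" && s != "0"
      if supervisor_exists then
        match dep.get? "UF_HEAD" with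
        | some s => some (s, order)
        | none => none
      else
        if !parent_exists then some ("None", order)
        else
          match dep.get? "PARENT" with
          | some p => pvFindSupA dd fuel p (order + 1)
          | none => none

def find_supervisor (departments_dict : List (String × List (String × String))) (current_dep : String) (order : Int) : String × Int :=
  (pvFindSupA (PySem.Dict.ofList departments_dict) (departments_dict.length + 1) current_dep order).getD ("None", order)

-- ===== PORT B =====
-- B's first loop: materialize the list of visited departments (fuel = length + 1,
-- enough for any walk Pre_ admits; exhaustion or a missing key gives none).
def pvCollect (dd : PySem.Dict String (List (String × String))) : Nat → String → Option (List (List (String × String)))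
  | 0, _ => none
  | fuel + 1, cur =>
    match dd.get? cur with
    | none => none        -- KeyError in Python: excluded by Pre_
    | some department =>
      let dep := PySem.Dict.ofList department
      let headTruthy := match dep.get? "UF_HEAD" with
        | some h => h != "" && h != "0"
        | none => false
      if headTruthy || !dep.contains "PARENT" then some [department]
      else
        match dep.get? "PARENT" with
        | some p => (pvCollect dd fuel p).map (department :: ·)
        | none => none

-- B's second loop: enumerate scan over the chain; i is the enumerate index.
def pvScan (order : Int) : List (List (String × String)) → Int → String × Int
  | [], i => ("None", order + i - 1)
  | department :: rest, i =>
    match (PySem.Dict.ofList department).get? "UF_HEAD" with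
    | some head => if head != "" && head != "0" then (head, order + i) else pvScan order rest (i + 1)
    | none => pvScan order rest (i + 1)

def find_supervisor_alt (departments_dict : List (String × List (String × String))) (current_dep : String) (order : Int) : String × Int :=
  match pvCollect (PySem.Dict.ofList departments_dict) (departments_dict.length + 1) current_dep with
  | none => ("None", order)
  | some chain => pvScan order chain 0

-- ===== PRECONDITION & SPEC =====
-- Whether the walk up the parent chain stays inside the dict and terminates
-- (within length+1 steps, which suffices for any acyclic chain).
def pvChainOk (dd : PySem.Dict String (List (String × String))) : Nat → String → Bool
  | 0, _ => false
  | fuel + 1, cur =>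
    match dd.get? cur with
    | none => false
    | some department =>
      let dep := PySem.Dict.ofList department
      match dep.get? "UF_HEAD" with
      | some head =>
        if head != "" && head != "0" then true
        else
          match dep.get? "PARENT" with
          | none => true
          | some p => pvChainOk dd fuel p
      | none =>
        match dep.get? "PARENT" with
        | none => true
        | some p => pvChainOk dd fuel p

-- Pre_ holds exactly on the inputs where Python A returns: the parent chain from
-- current_dep stays inside the dict and reaches a truthy UF_HEAD or a parentless
-- node; otherwise A raises KeyError (missing key) or RecursionError (a cycle).
def Pre_find_supervisor (departments_dict : List (String × List (String × String))) (current_dep : String) (order : Int) : Prop :=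
  pvChainOk (PySem.Dict.ofList departments_dict) (departments_dict.length + 1) current_dep = true
instance (departments_dict : List (String × List (String × String))) (current_dep : String) (order : Int) : Decidable (Pre_find_supervisor departments_dict current_dep order) := by unfold Pre_find_supervisor; infer_instance

def pvWitness_find_supervisor : (List (String × List (String × String))) × String × Int :=
  ([("1", [("UF_HEAD", "0"), ("PARENT", "2")]), ("2", [("UF_HEAD", "boss")])], "1", 0)

def Spec_find_supervisor (departments_dict : List (String × List (String × String))) (current_dep : String) (order : Int) (out : String × Int) : Prop := out = find_supervisor_alt departments_dict current_dep order
instance (departments_dict : List (String × List (String × String))) (current_dep : String) (order : Int) (out : String × Int) : Decidable (Spec_find_supervisor departments_dict current_dep order out) := by unfold Spec_find_supervisor; infer_instance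

-- ===== CLAIM (what is proved, stated in full; the proofs are below) =====
def Claim_equal_find_supervisor : Prop := ∀ (departments_dict : List (String × List (String × String))) (current_dep : String) (order : Int), Dom_find_supervisor departments_dict current_dep order → Pre_find_supervisor departments_dict current_dep order → Spec_find_supervisor departments_dict current_dep order (find_supervisor departments_dict current_dep order)

-- ===== LEMMAS AND PROOFS =====
-- Shifting the base order by one is the same as shifting the enumerate index.
theorem pvScan_shift (chain : List (List (String × String))) :
    ∀ (o i : Int), pvScan o chain (i + 1) = pvScan (o + 1) chain i := by
  induction chain with
  | nil => intro o i; simp only [pvScan]; congr 1; omega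
  | cons d rest ih =>
    intro o i
    simp only [pvScan]
    cases (PySem.Dict.ofList d).get? "UF_HEAD" with
    | none => exact ih o (i + 1)
    | some head =>
      by_cases ht : (head != "" && head != "0") = true
      · simp only [ht, if_true]; congr 1; omega
      · simp only [Bool.not_eq_true] at ht
        simp only [ht, if_false]
        exact ih o (i + 1)

-- A's recursion equals "collect the chain, then scan it", for every fuel.
theorem pvFindSupA_eq_collect_scan (dd : PySem.Dict String (List (String × String))) :
    ∀ (fuel : Nat) (cur : String) (order : Int),
      pvFindSupA dd fuel cur order = (pvCollect dd fuel cur).map (fun ch => pvScan order ch 0) := by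
  intro fuel
  induction fuel with
  | zero => intro cur order; rfl
  | succ n ih =>
    intro cur order
    simp only [pvFindSupA, pvCollect]
    cases dd.get? cur with
    | none => rfl
    | some department =>
      simp only []
      cases hh : (PySem.Dict.ofList department).get? "UF_HEAD" with
      | some head =>
        by_cases ht : (head != "" && head != "0") = true
        · simp [hh, ht, pvScan]
        · simp only [Bool.not_eq_true] at ht
          cases hp : (PySem.Dict.ofList department).get? "PARENT" with
          | none =>
            have hc : (PySem.Dict.ofList department).contains "PARENT" = false := by
              rw [PySem.Dict.contains_eq_isSome_get?, hp]; rfl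
            simp only [hc]
            simp [pvScan, hh, ht, Prod.ext_iff]
          | some p =>
            have hc : (PySem.Dict.ofList department).contains "PARENT" = true := by
              rw [PySem.Dict.contains_eq_isSome_get?, hp]; rfl
            simp only [hh, ht, hp, hc, Bool.false_or, Bool.not_true, if_neg, ih,
              Option.map_map]
            cases pvCollect dd n p with
            | none => rfl
            | some ch =>
              simp only [Option.map_some, Function.comp]
              have : pvScan order (department :: ch) 0 = pvScan (order + 1) ch 0 := by
                simp only [pvScan, hh, ht, if_false]
                have := pvScan_shift ch order 0
                simpa using this
              simp [this]
      | none =>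
        cases hp : (PySem.Dict.ofList department).get? "PARENT" with
        | none =>
          have hc : (PySem.Dict.ofList department).contains "PARENT" = false := by
            rw [PySem.Dict.contains_eq_isSome_get?, hp]; rfl
          simp only [hc]
          simp [pvScan, hh, Prod.ext_iff]
        | some p =>
          have hc : (PySem.Dict.ofList department).contains "PARENT" = true := by
            rw [PySem.Dict.contains_eq_isSome_get?, hp]; rfl
          simp only [hh, hp, hc, Bool.false_or, Bool.not_true, ih, Option.map_map]
          cases pvCollect dd n p with
          | none => rfl
          | some ch =>
            simp only [Option.map_some, Function.comp]
            have : pvScan order (department :: ch) 0 = pvScan (order + 1) ch 0 := by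
              simp only [pvScan, hh]
              have := pvScan_shift ch order 0
              simpa using this
            simp [this]

-- ===== VERDICT (by name: the statement is the Claim_ definition above) =====
theorem find_supervisor_spec : Claim_equal_find_supervisor := by
  intro departments_dict current_dep order _ _
  unfold Spec_find_supervisor find_supervisor find_supervisor_alt
  rw [pvFindSupA_eq_collect_scan]
  cases pvCollect (PySem.Dict.ofList departments_dict) (departments_dict.length + 1) current_dep with
  | none => rfl
  | some ch => rfl
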